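-- pv_equiv track=rewrite | github.com/FokaKefir/DiszkretMatekPython | lab05/lab05.py | convBtoBk
-- ===== SOURCE A (Python) =====
-- def convBtoBk(lst, b, k):
--     n = 0
--     lstBk = []
--     nr = 0
--     for x in lst[::-1]:
--         if n == k:
--             lstBk = [nr] + lstBk
--             n = 0
--             nr = 0
--         nr += b ** n * x
--         n += 1
--     lstBk = [nr] + lstBk
--     return lstBk
-- ===== SOURCE B (Python) =====
-- def convBtoBk(lst, b, k):
--     rev = lst[::-1]
--     out = []
--     for i in range(0, max(len(rev), 1), k):
--         chunk = rev[i:i+k]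
--         out.append(sum(d * b**j for j, d in enumerate(chunk)))
--     out.reverse()
--     return out
-- ===== Notes on version B (the rewrite author's own statement) =====
-- stated objective: alternative
-- what changed: A's single flat pass with manual group-boundary bookkeeping (n/nr counters, prepend on flush) is replaced by an outer loop over chunk start indices in steps of k with an inner per-chunk positional sum over each slice, appending and reversing at the end. Pre_ excludes k <= 0 (a chunk size, the task's natural domain is k >= 1), on which A's returned values are accidents of its never-firing/once-firing flush and B's range() raises or yields nothing.
-- outside the precondition, e.g. on convBtoBk([1, 2, 3], 2, 0): A returns [11, 0], B raises ValueError; on convBtoBk([1, 2, 3], 2, -1): A returns [11], B returns []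
import Mathlib
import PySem

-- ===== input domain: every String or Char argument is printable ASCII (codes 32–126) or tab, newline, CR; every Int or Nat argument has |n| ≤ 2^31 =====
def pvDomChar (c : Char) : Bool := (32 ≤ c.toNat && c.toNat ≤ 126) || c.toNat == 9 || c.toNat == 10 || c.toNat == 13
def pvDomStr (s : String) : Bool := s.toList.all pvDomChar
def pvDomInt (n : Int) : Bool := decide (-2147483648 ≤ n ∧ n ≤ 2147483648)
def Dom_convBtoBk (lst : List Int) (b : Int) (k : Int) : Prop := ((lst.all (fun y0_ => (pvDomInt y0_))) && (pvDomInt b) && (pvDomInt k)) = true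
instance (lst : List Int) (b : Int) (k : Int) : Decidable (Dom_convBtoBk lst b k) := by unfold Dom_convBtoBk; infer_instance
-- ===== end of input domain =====

-- B regroups base-b digits into base-b^k digits by an outer loop over chunk start
-- indices with an inner per-chunk positional sum, instead of A's flat pass with
-- flush-on-full counters; objective: alternative decomposition (same cost).

-- ===== PORT A =====
-- state: (n, nr, lstBk); loop body over lst[::-1]
def convBtoBkStep (b : Int) (k : Int) (st : Int × Int × List Int) (x : Int) : Int × Int × List Int :=
  let p := if st.1 = k then ((0 : Int), (0 : Int), st.2.1 :: st.2.2) else st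
  (p.1 + 1, p.2.1 + b ^ p.1.toNat * x, p.2.2)

def convBtoBk (lst : List Int) (b : Int) (k : Int) : List Int :=
  let st := lst.reverse.foldl (convBtoBkStep b k) (0, 0, [])
  st.2.1 :: st.2.2

-- ===== PORT B =====
-- sum(d * b**j for j, d in enumerate(chunk))
def chunkVal (b : Int) (chunk : List Int) : Int :=
  (PySem.List.enumerate chunk 0).foldl (fun s p => s + p.2 * b ^ p.1.toNat) 0

def convBtoBk_alt (lst : List Int) (b : Int) (k : Int) : List Int :=
  let rev := lst.reverse
  let out := (PySem.List.pyRange 0 (max (rev.length : Int) 1) k).foldl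
    (fun out i => out ++ [chunkVal b (PySem.List.slice rev (some i) (some (i + k)))]) []
  out.reverse

-- ===== PRECONDITION & SPEC =====
-- Pre_ excludes k ≤ 0 (k is a chunk size; the natural domain is k ≥ 1): there A's
-- returned values are accidents of its never/once-firing flush and B's range() raises (k = 0) or yields nothing.
def Pre_convBtoBk (lst : List Int) (b : Int) (k : Int) : Prop := 1 ≤ k
instance (lst : List Int) (b : Int) (k : Int) : Decidable (Pre_convBtoBk lst b k) := by unfold Pre_convBtoBk; infer_instance
def pvWitness_convBtoBk : List Int × Int × Int := ([3, 1, 4, 1], 2, 2)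

def Spec_convBtoBk (lst : List Int) (b : Int) (k : Int) (out : List Int) : Prop := out = convBtoBk_alt lst b k
instance (lst : List Int) (b : Int) (k : Int) (out : List Int) : Decidable (Spec_convBtoBk lst b k out) := by unfold Spec_convBtoBk; infer_instance

-- ===== CLAIM (what is proved, stated in full; the proofs are below) =====
def Claim_equal_convBtoBk : Prop := ∀ (lst : List Int) (b : Int) (k : Int), Dom_convBtoBk lst b k → Pre_convBtoBk lst b k → Spec_convBtoBk lst b k (convBtoBk lst b k)

-- ===== LEMMAS AND PROOFS =====

-- reference value of a chunk (least-significant digit first)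
def pvVal (b : Int) : List Int → Int
  | [] => 0
  | x :: c => x + b * pvVal b c

-- reference chunking of the reversed digit list, most-significant chunk first
def pvG (K : Nat) (b : Int) (r : List Int) : List Int :=
  if r.length ≤ K ∨ K = 0 then [pvVal b r]
  else pvG K b (r.drop K) ++ [pvVal b (r.take K)]
  termination_by r.length
  decreasing_by simp_all; omega

theorem pvG_small (K : Nat) (b : Int) (r : List Int) (hle : r.length ≤ K) :
    pvG K b r = [pvVal b r] := by
  rw [pvG]; simp [hle]

theorem pvG_big (K : Nat) (b : Int) (r : List Int) (h : ¬(r.length ≤ K ∨ K = 0)) :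
    pvG K b r = pvG K b (r.drop K) ++ [pvVal b (r.take K)] := by
  rw [pvG]; simp only [if_neg h]

theorem pvVal_eq_chunkVal_aux (b : Int) (c : List Int) : ∀ (s : Int) (acc : Int), 0 ≤ s →
    (PySem.List.enumerate c s).foldl (fun a p => a + p.2 * b ^ p.1.toNat) acc
      = acc + b ^ s.toNat * pvVal b c := by
  induction c with
  | nil => intro s acc _; simp [PySem.List.enumerate_nil, pvVal]
  | cons x c ih =>
    intro s acc hs
    rw [PySem.List.enumerate_cons]
    simp only [List.foldl_cons]
    rw [ih (s + 1) _ (by omega)]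
    have h1 : (s + 1).toNat = s.toNat + 1 := by omega
    rw [h1, pvVal]
    rw [pow_succ]
    ring

theorem pvVal_eq_chunkVal (b : Int) (c : List Int) : chunkVal b c = pvVal b c := by
  have := pvVal_eq_chunkVal_aux b c 0 0 le_rfl
  simpa [chunkVal] using this

-- A's loop on a block that fits into the current group
theorem convBtoBk_accum (b : Int) (K : Nat) (c : List Int) :
    ∀ (n : Int) (nr : Int) (L : List Int), 0 ≤ n → n.toNat + c.length ≤ K →
      c.foldl (convBtoBkStep b (K : Int)) (n, nr, L)
        = (n + c.length, nr + b ^ n.toNat * pvVal b c, L) := by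
  induction c with
  | nil => intro n nr L _ _; simp [pvVal]
  | cons x c ih =>
    intro n nr L hn hle
    simp only [List.foldl_cons]
    have hne : n ≠ (K : Int) := by
      simp only [List.length_cons] at hle; omega
    rw [show convBtoBkStep b (K : Int) (n, nr, L) x
        = (n + 1, nr + b ^ n.toNat * x, L) by
      simp [convBtoBkStep, hne]]
    rw [ih (n + 1) _ L (by omega) (by simp at hle ⊢; omega)]
    have h1 : (n + 1).toNat = n.toNat + 1 := by omega
    rw [h1, pvVal]
    simp only [List.length_cons, Prod.mk.injEq]
    refine ⟨by push_cast; ring, ?_, trivial⟩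
    rw [pow_succ]
    ring

-- A's whole loop computes pvG
theorem convBtoBk_loop (b : Int) (K : Nat) (hK : 1 ≤ K) (r : List Int) :
    ∀ (L : List Int),
      (fun st : Int × Int × List Int => st.2.1 :: st.2.2)
          (r.foldl (convBtoBkStep b (K : Int)) (0, 0, L))
        = pvG K b r ++ L := by
  induction r using pvG.induct K with
  | case1 r h =>
    intro L
    have hlen : r.length ≤ K := by omega
    rw [convBtoBk_accum b K r 0 0 L le_rfl (by simpa using hlen)]
    rw [pvG_small K b r hlen]
    simp
  | case2 r h ih =>
    intro L
    have hlen : K < r.length := by omega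
    have hsplit : r = r.take K ++ r.drop K := (List.take_append_drop K r).symm
    conv_lhs => rw [hsplit]
    rw [List.foldl_append]
    rw [convBtoBk_accum b K (r.take K) 0 0 L le_rfl
      (by simp only [Int.toNat_zero, zero_add, List.length_take]; omega)]
    have htk : ((r.take K).length : Int) = (K : Int) := by
      simp [List.length_take]; omega
    have hst : ((0 : Int) + ((r.take K).length : Int),
          (0 : Int) + b ^ (0 : Int).toNat * pvVal b (r.take K), L)
        = ((K : Int), pvVal b (r.take K), L) := by
      rw [htk]; simp
    rw [hst]
    obtain ⟨y, rest, hdrop⟩ : ∃ y rest, r.drop K = y :: rest := by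
      rcases hd : r.drop K with _ | ⟨y, rest⟩
      · exfalso
        have := List.length_drop (l := r) (i := K)
        rw [hd] at this; simp at this; omega
      · exact ⟨y, rest, rfl⟩
    rw [hdrop]
    simp only [List.foldl_cons]
    have h0K : ¬((0 : Int) = (K : Int)) := by omega
    have hflush : convBtoBkStep b (K : Int) ((K : Int), pvVal b (r.take K), L) y
        = convBtoBkStep b (K : Int) (0, 0, pvVal b (r.take K) :: L) y := by
      simp [convBtoBkStep, h0K]
    rw [hflush]
    have hrec := ih (pvVal b (r.take K) :: L)
    rw [hdrop] at hrec
    simp only [List.foldl_cons] at hrec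
    rw [hrec]
    rw [pvG_big K b r h, hdrop]
    simp

-- pyRange with positive step K: the singleton case
theorem pyRange_pos_singleton (M : Int) (K : Nat) (hK : 1 ≤ K) (h1 : 1 ≤ M) (h2 : M ≤ (K : Int)) :
    PySem.List.pyRange 0 M (K : Int) = [0] := by
  rw [PySem.List.pyRange_of_pos 0 M (by exact_mod_cast hK)]
  have hlt : (0 : Int) < M := h1
  rw [if_pos hlt]
  have hdiv : (M - 0 + (K : Int) - 1) / (K : Int) = 1 := by
    have hKpos : (0 : Int) < (K : Int) := by exact_mod_cast hK
    have hlo : 1 ≤ (M - 0 + (K : Int) - 1) / (K : Int) := by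
      rw [Int.le_ediv_iff_mul_le hKpos]; omega
    have hhi : (M - 0 + (K : Int) - 1) / (K : Int) < 2 := by
      rw [Int.ediv_lt_iff_lt_mul hKpos]; omega
    omega
  rw [hdiv]
  simp

-- pyRange with positive step K: peel off the first chunk start
theorem pyRange_pos_cons (M : Int) (K : Nat) (hK : 1 ≤ K) (h : (K : Int) < M) :
    PySem.List.pyRange 0 M (K : Int)
      = 0 :: (PySem.List.pyRange 0 (M - (K : Int)) (K : Int)).map (· + (K : Int)) := by
  have hKpos : (0 : Int) < (K : Int) := by exact_mod_cast hK
  rw [PySem.List.pyRange_of_pos 0 M hKpos, PySem.List.pyRange_of_pos 0 (M - K) hKpos]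
  have h1 : (0 : Int) < M := by omega
  have h2 : (0 : Int) < M - (K : Int) := by omega
  rw [if_pos h1, if_pos h2]
  have hdiv : (M - 0 + (K : Int) - 1) / (K : Int) = (M - (K : Int) - 0 + (K : Int) - 1) / (K : Int) + 1 := by
    have := Int.add_mul_ediv_right (M - (K : Int) - 0 + (K : Int) - 1) 1 (show (K : Int) ≠ 0 by omega)
    simp only [one_mul] at this
    have harg : M - 0 + (K : Int) - 1 = M - (K : Int) - 0 + (K : Int) - 1 + (K : Int) := by ring
    rw [harg, this]
  rw [hdiv]
  have hN : ((M - (K : Int) - 0 + (K : Int) - 1) / (K : Int) + 1).toNat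
      = ((M - (K : Int) - 0 + (K : Int) - 1) / (K : Int)).toNat + 1 := by
    have hnn : 0 ≤ (M - (K : Int) - 0 + (K : Int) - 1) / (K : Int) :=
      Int.ediv_nonneg (by omega) (by omega)
    omega
  rw [hN, List.range_succ_eq_map]
  simp only [List.map_cons, List.map_map]
  congr 1
  apply List.map_congr_left
  intro a _
  simp only [Function.comp_apply]
  push_cast
  ring

-- slice r [0:K] is take, when the whole list fits it is r
theorem slice_zero_K (K : Nat) (r : List Int) :
    PySem.List.slice r (some (0 : Int)) (some (0 + (K : Int))) = r.take K := by
  rw [show (0 : Int) + (K : Int) = ((K : Nat) : Int) by omega,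
      show (some (0 : Int)) = some (((0 : Nat) : Int)) by norm_num,
      PySem.List.slice_natCast]
  simp

-- B's chunk map computes pvG (reversed)
theorem convBtoBk_alt_chunks (b : Int) (K : Nat) (hK : 1 ≤ K) (r : List Int) :
    ((PySem.List.pyRange 0 (max (r.length : Int) 1) (K : Int)).map
        (fun i => pvVal b (PySem.List.slice r (some i) (some (i + (K : Int)))))).reverse
      = pvG K b r := by
  induction r using pvG.induct K with
  | case1 r h =>
    have hlen : r.length ≤ K := by omega
    have hM1 : (1 : Int) ≤ max (r.length : Int) 1 := le_max_right _ _
    have hM2 : max (r.length : Int) 1 ≤ (K : Int) :=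
      max_le (by exact_mod_cast hlen) (by exact_mod_cast hK)
    rw [pyRange_pos_singleton _ K hK hM1 hM2]
    rw [pvG_small K b r hlen]
    simp only [List.map_cons, List.map_nil, List.reverse_cons, List.reverse_nil, List.nil_append]
    rw [slice_zero_K K r, List.take_of_length_le hlen]
  | case2 r h ih =>
    have hlen : K < r.length := by omega
    have hM : max (r.length : Int) 1 = (r.length : Int) := by
      apply max_eq_left; exact_mod_cast Nat.one_le_iff_ne_zero.mpr (by omega)
    have hdroplen : ((r.drop K).length : Int) = (r.length : Int) - (K : Int) := by
      simp [List.length_drop]; omega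
    have hrange : (r.length : Int) - (K : Int) = max ((r.drop K).length : Int) 1 := by
      rw [hdroplen]; symm; apply max_eq_left; omega
    rw [hM, pyRange_pos_cons _ K hK (by exact_mod_cast hlen)]
    simp only [List.map_cons, List.map_map, List.reverse_cons]
    have hmapeq : (PySem.List.pyRange 0 ((r.length : Int) - (K : Int)) (K : Int)).map
          ((fun i => pvVal b (PySem.List.slice r (some i) (some (i + (K : Int))))) ∘ (· + (K : Int)))
        = (PySem.List.pyRange 0 ((r.length : Int) - (K : Int)) (K : Int)).map
          (fun i => pvVal b (PySem.List.slice (r.drop K) (some i) (some (i + (K : Int))))) := by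
      apply List.map_congr_left
      intro i hi
      have hipos : 0 ≤ i :=
        ((PySem.List.mem_pyRange_iff_of_pos (by exact_mod_cast hK) i).mp hi).1
      simp only [Function.comp_apply]
      rw [PySem.List.slice_toNat, PySem.List.slice_toNat, List.drop_drop]
      congr 1
      congr 1
      · omega
      · congr 1
        omega
      all_goals omega
    rw [hmapeq, hrange, ih]
    rw [pvG_big K b r h]
    congr 1
    rw [slice_zero_K K r]

-- B's foldl builds the mapped list
theorem foldl_push {α β : Type} (f : α → β) (l : List α) :
    ∀ (acc : List β), l.foldl (fun out i => out ++ [f i]) acc = acc ++ l.map f := by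
  induction l with
  | nil => intro acc; simp
  | cons x l ih => intro acc; simp [ih]

-- ===== VERDICT (by name: the statement is the Claim_ definition above) =====
theorem convBtoBk_spec : Claim_equal_convBtoBk := by
  intro lst b k _ hk
  unfold Spec_convBtoBk
  set K : Nat := k.toNat with hKdef
  have hkK : k = (K : Int) := by unfold Pre_convBtoBk at hk; omega
  have hK1 : 1 ≤ K := by unfold Pre_convBtoBk at hk; omega
  unfold convBtoBk convBtoBk_alt
  dsimp only
  rw [hkK]
  rw [foldl_push (fun i => chunkVal b (PySem.List.slice lst.reverse (some i) (some (i + (K : Int))))) _ []]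
  simp only [List.nil_append]
  have hcv : (PySem.List.pyRange 0 (max (lst.reverse.length : Int) 1) (K : Int)).map
        (fun i => chunkVal b (PySem.List.slice lst.reverse (some i) (some (i + (K : Int)))))
      = (PySem.List.pyRange 0 (max (lst.reverse.length : Int) 1) (K : Int)).map
        (fun i => pvVal b (PySem.List.slice lst.reverse (some i) (some (i + (K : Int))))) := by
    apply List.map_congr_left; intro i _; rw [pvVal_eq_chunkVal]
  rw [hcv, convBtoBk_alt_chunks b K hK1 lst.reverse]
  have := convBtoBk_loop b K hK1 lst.reverse []
  simpa using this
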